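-- pv_equiv track=rewrite | github.com/shaineshnand/AI-Autofill-Assistant | html_pdf_processor.py | _generate_contextual_placeholder
-- ===== SOURCE A (Python) =====
-- def _generate_contextual_placeholder(text: str, position: int) -> str:
--     """Generate a contextual placeholder based on surrounding text"""
--     # Get context around the field position
--     start = max(0, position - 50)
--     end = min(len(text), position + 50)
--     context = text[start:end].lower()
--
--     # Common field type patterns
--     if any(word in context for word in ['name', 'full name', 'given name', 'family name']):
--         return "Enter name"
--     elif any(word in context for word in ['address', 'street', 'location']):
--         return "Enter address"
--     elif any(word in context for word in ['date', 'day', 'month', 'year']):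
--         return "Enter date"
--     elif any(word in context for word in ['phone', 'mobile', 'contact', 'number']):
--         return "Enter phone number"
--     elif any(word in context for word in ['email', 'e-mail']):
--         return "Enter email"
--     elif any(word in context for word in ['id', 'identification', 'student id']):
--         return "Enter ID number"
--     elif any(word in context for word in ['signature', 'sign']):
--         return "Enter signature"
--     elif any(word in context for word in ['amount', 'salary', 'wage', 'money', 'cost']):
--         return "Enter amount"
--     elif any(word in context for word in ['age', 'birth', 'born']):
--         return "Enter age"
--     elif any(word in context for word in ['company', 'employer', 'organization']):
--         return "Enter company name"
--     elif any(word in context for word in ['position', 'job', 'title', 'role']):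
--         return "Enter position"
--     elif any(word in context for word in ['department', 'division']):
--         return "Enter department"
--     elif any(word in context for word in ['city', 'town']):
--         return "Enter city"
--     elif any(word in context for word in ['country', 'nation']):
--         return "Enter country"
--     elif any(word in context for word in ['postcode', 'zip', 'code']):
--         return "Enter postcode"
--     elif any(word in context for word in ['yes', 'no', 'agree', 'accept']):
--         return "Enter yes/no"
--     else:
--         return "Enter value"
-- ===== SOURCE B (Python) =====
-- # Alternative algorithm: one scan over the context's character positions with
-- # hand substring matching (startswith at each offset) keeping a running minimum
-- # priority, instead of per-group `in` membership tests in an early-return chain.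
-- _RESULTS = ["Enter name", "Enter address", "Enter date", "Enter phone number",
--             "Enter email", "Enter ID number", "Enter signature", "Enter amount",
--             "Enter age", "Enter company name", "Enter position", "Enter department",
--             "Enter city", "Enter country", "Enter postcode", "Enter yes/no",
--             "Enter value"]
-- _KEYWORDS = [("name", 0), ("full name", 0), ("given name", 0), ("family name", 0),
--              ("address", 1), ("street", 1), ("location", 1),
--              ("date", 2), ("day", 2), ("month", 2), ("year", 2),
--              ("phone", 3), ("mobile", 3), ("contact", 3), ("number", 3),
--              ("email", 4), ("e-mail", 4),
--              ("id", 5), ("identification", 5), ("student id", 5),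
--              ("signature", 6), ("sign", 6),
--              ("amount", 7), ("salary", 7), ("wage", 7), ("money", 7), ("cost", 7),
--              ("age", 8), ("birth", 8), ("born", 8),
--              ("company", 9), ("employer", 9), ("organization", 9),
--              ("position", 10), ("job", 10), ("title", 10), ("role", 10),
--              ("department", 11), ("division", 11),
--              ("city", 12), ("town", 12),
--              ("country", 13), ("nation", 13),
--              ("postcode", 14), ("zip", 14), ("code", 14),
--              ("yes", 15), ("no", 15), ("agree", 15), ("accept", 15)]
--
-- def _generate_contextual_placeholder(text: str, position: int) -> str:
--     start = max(0, position - 50)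
--     end = min(len(text), position + 50)
--     context = text[start:end].lower()
--     best = 16
--     for i in range(len(context)):
--         for kw, pri in _KEYWORDS:
--             if pri < best and context.startswith(kw, i):
--                 best = pri
--     return _RESULTS[best]
-- ===== Notes on version B (the rewrite author's own statement) =====
-- stated objective: alternative
-- what changed: Replaced the 17-branch chain of per-group substring-membership tests by a single position-major scan over the context that hand-matches a flat keyword table with startswith at each offset, keeps a running minimum priority, and indexes a results table once.
import Mathlib
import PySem

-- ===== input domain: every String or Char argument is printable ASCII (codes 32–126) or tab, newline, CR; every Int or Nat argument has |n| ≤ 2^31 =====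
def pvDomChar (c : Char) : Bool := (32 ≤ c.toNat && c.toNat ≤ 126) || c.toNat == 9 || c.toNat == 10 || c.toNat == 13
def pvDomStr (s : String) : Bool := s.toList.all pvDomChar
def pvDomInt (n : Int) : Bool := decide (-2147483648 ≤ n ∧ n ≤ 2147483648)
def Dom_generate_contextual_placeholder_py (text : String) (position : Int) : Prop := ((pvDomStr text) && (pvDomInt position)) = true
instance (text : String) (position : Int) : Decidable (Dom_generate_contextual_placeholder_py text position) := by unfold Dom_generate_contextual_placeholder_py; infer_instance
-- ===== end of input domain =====

-- B replaces A's 17-branch membership-test chain by a single position-major scan of the context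
-- that hand-matches a flat keyword table and keeps a running minimum priority (objective: alternative).

set_option maxRecDepth 10000


-- ===== PORT A =====
-- literal transliteration of the if/elif chain
def generate_contextual_placeholder_py (text : String) (position : Int) : String :=
  let start := max 0 (position - 50)
  let stop := min (PySem.Str.len text) (position + 50)
  let context := PySem.Str.lower (PySem.Str.slice text (some start) (some stop))
  if (["name", "full name", "given name", "family name"] : List String).any (fun w => PySem.Str.isIn w context) then "Enter name"
  else if (["address", "street", "location"] : List String).any (fun w => PySem.Str.isIn w context) then "Enter address"
  else if (["date", "day", "month", "year"] : List String).any (fun w => PySem.Str.isIn w context) then "Enter date"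
  else if (["phone", "mobile", "contact", "number"] : List String).any (fun w => PySem.Str.isIn w context) then "Enter phone number"
  else if (["email", "e-mail"] : List String).any (fun w => PySem.Str.isIn w context) then "Enter email"
  else if (["id", "identification", "student id"] : List String).any (fun w => PySem.Str.isIn w context) then "Enter ID number"
  else if (["signature", "sign"] : List String).any (fun w => PySem.Str.isIn w context) then "Enter signature"
  else if (["amount", "salary", "wage", "money", "cost"] : List String).any (fun w => PySem.Str.isIn w context) then "Enter amount"
  else if (["age", "birth", "born"] : List String).any (fun w => PySem.Str.isIn w context) then "Enter age"
  else if (["company", "employer", "organization"] : List String).any (fun w => PySem.Str.isIn w context) then "Enter company name"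
  else if (["position", "job", "title", "role"] : List String).any (fun w => PySem.Str.isIn w context) then "Enter position"
  else if (["department", "division"] : List String).any (fun w => PySem.Str.isIn w context) then "Enter department"
  else if (["city", "town"] : List String).any (fun w => PySem.Str.isIn w context) then "Enter city"
  else if (["country", "nation"] : List String).any (fun w => PySem.Str.isIn w context) then "Enter country"
  else if (["postcode", "zip", "code"] : List String).any (fun w => PySem.Str.isIn w context) then "Enter postcode"
  else if (["yes", "no", "agree", "accept"] : List String).any (fun w => PySem.Str.isIn w context) then "Enter yes/no"
  else "Enter value"

-- ===== PORT B =====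
-- Source B's _RESULTS table (17 entries; index 16 = the no-match default)
def pvResults : List String :=
  ["Enter name", "Enter address", "Enter date", "Enter phone number",
   "Enter email", "Enter ID number", "Enter signature", "Enter amount",
   "Enter age", "Enter company name", "Enter position", "Enter department",
   "Enter city", "Enter country", "Enter postcode", "Enter yes/no",
   "Enter value"]

-- Source B's flat _KEYWORDS table of (keyword, priority) pairs
def pvKeywords : List (String × Nat) :=
  [("name", 0), ("full name", 0), ("given name", 0), ("family name", 0),
   ("address", 1), ("street", 1), ("location", 1),
   ("date", 2), ("day", 2), ("month", 2), ("year", 2),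
   ("phone", 3), ("mobile", 3), ("contact", 3), ("number", 3),
   ("email", 4), ("e-mail", 4),
   ("id", 5), ("identification", 5), ("student id", 5),
   ("signature", 6), ("sign", 6),
   ("amount", 7), ("salary", 7), ("wage", 7), ("money", 7), ("cost", 7),
   ("age", 8), ("birth", 8), ("born", 8),
   ("company", 9), ("employer", 9), ("organization", 9),
   ("position", 10), ("job", 10), ("title", 10), ("role", 10),
   ("department", 11), ("division", 11),
   ("city", 12), ("town", 12),
   ("country", 13), ("nation", 13),
   ("postcode", 14), ("zip", 14), ("code", 14),
   ("yes", 15), ("no", 15), ("agree", 15), ("accept", 15)]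

-- Python's context.startswith(kw, i) for 0 ≤ i: exact as a prefix test on the dropped character list
def pvStartsWithAt (ctx : List Char) (i : Nat) (kw : String) : Bool :=
  kw.toList.isPrefixOf (ctx.drop i)

-- Source B's double loop: for i in range(len(context)): for kw, pri in _KEYWORDS: …
-- then _RESULTS[best]; best ≤ 16 always holds, so the getD default is unreachable and the indexing is exact.
def generate_contextual_placeholder_py_alt (text : String) (position : Int) : String :=
  let start := max 0 (position - 50)
  let stop := min (PySem.Str.len text) (position + 50)
  let context := PySem.Str.lower (PySem.Str.slice text (some start) (some stop))
  let ctx := context.toList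
  let best := (PySem.List.pyRange 0 (ctx.length : Int) 1).foldl
      (fun best i => pvKeywords.foldl
        (fun b e => if e.2 < b ∧ pvStartsWithAt ctx i.toNat e.1 then e.2 else b) best) 16
  pvResults.getD best "Enter value"

-- ===== PRECONDITION & SPEC =====
def Spec_generate_contextual_placeholder_py (text : String) (position : Int) (out : String) : Prop := out = generate_contextual_placeholder_py_alt text position
instance (text : String) (position : Int) (out : String) : Decidable (Spec_generate_contextual_placeholder_py text position out) := by unfold Spec_generate_contextual_placeholder_py; infer_instance

-- ===== CLAIM (what is proved, stated in full; the proofs are below) =====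
def Claim_equal_generate_contextual_placeholder_py : Prop := ∀ (text : String) (position : Int), Dom_generate_contextual_placeholder_py text position → Spec_generate_contextual_placeholder_py text position (generate_contextual_placeholder_py text position)

-- ===== LEMMAS AND PROOFS =====

-- proof-side view of A's sixteen keyword groups, in chain order
def pvGroups : List (List String) :=
  [["name", "full name", "given name", "family name"],
   ["address", "street", "location"],
   ["date", "day", "month", "year"],
   ["phone", "mobile", "contact", "number"],
   ["email", "e-mail"],
   ["id", "identification", "student id"],
   ["signature", "sign"],
   ["amount", "salary", "wage", "money", "cost"],
   ["age", "birth", "born"],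
   ["company", "employer", "organization"],
   ["position", "job", "title", "role"],
   ["department", "division"],
   ["city", "town"],
   ["country", "nation"],
   ["postcode", "zip", "code"],
   ["yes", "no", "agree", "accept"]]

-- "group p has a keyword occurring in context" — A's p-th branch condition
def pvM (context : String) (p : Nat) : Bool :=
  (pvGroups.getD p []).any (fun w => PySem.Str.isIn w context)

-- the inner fold of B, abstracted over the keyword list
def pvFoldIn (ctx : List Char) (i : Nat) (L : List (String × Nat)) (b : Nat) : Nat :=
  L.foldl (fun b e => if e.2 < b ∧ pvStartsWithAt ctx i e.1 then e.2 else b) b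

-- the whole double loop of B
def pvBest (ctx : List Char) : Nat :=
  (PySem.List.pyRange 0 (ctx.length : Int) 1).foldl
    (fun best i => pvFoldIn ctx i.toNat pvKeywords best) 16

theorem pvFoldIn_le (ctx : List Char) (i : Nat) (L : List (String × Nat)) (b : Nat) :
    pvFoldIn ctx i L b ≤ b := by
  induction L generalizing b with
  | nil => simp [pvFoldIn]
  | cons e L ih =>
    simp only [pvFoldIn, List.foldl_cons]
    split_ifs with h
    · exact le_trans (ih _) (le_of_lt h.1)
    · exact ih b

theorem pvFoldIn_le_of_mem (ctx : List Char) (i : Nat) (L : List (String × Nat)) (b : Nat)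
    (e : String × Nat) (he : e ∈ L) (hm : pvStartsWithAt ctx i e.1 = true) :
    pvFoldIn ctx i L b ≤ e.2 := by
  induction L generalizing b with
  | nil => cases he
  | cons e' L ih =>
    simp only [pvFoldIn, List.foldl_cons]
    rcases List.mem_cons.mp he with rfl | he'
    · split_ifs with h
      · exact pvFoldIn_le ctx i L e.2
      · rw [not_and_or] at h
        rcases h with h | h
        · exact le_trans (pvFoldIn_le ctx i L b) (not_lt.mp h)
        · exact absurd hm h
    · split_ifs with h
      · exact ih e'.2 he'
      · exact ih b he'

theorem pvFoldIn_cases (ctx : List Char) (i : Nat) (L : List (String × Nat)) (b : Nat) :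
    pvFoldIn ctx i L b = b ∨
      ∃ e ∈ L, pvStartsWithAt ctx i e.1 = true ∧ pvFoldIn ctx i L b = e.2 := by
  induction L generalizing b with
  | nil => left; simp [pvFoldIn]
  | cons e L ih =>
    simp only [pvFoldIn, List.foldl_cons]
    split_ifs with h
    · rcases ih e.2 with h' | ⟨e', he', hm', hv'⟩
      · right; exact ⟨e, List.mem_cons_self .., h.2, h'⟩
      · right; exact ⟨e', List.mem_cons_of_mem _ he', hm', hv'⟩
    · rcases ih b with h' | ⟨e', he', hm', hv'⟩
      · left; exact h'
      · right; exact ⟨e', List.mem_cons_of_mem _ he', hm', hv'⟩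

def pvFoldOut (ctx : List Char) : List Int → Nat → Nat
  | [], b => b
  | i :: R, b => pvFoldOut ctx R (pvFoldIn ctx i.toNat pvKeywords b)

theorem pvFoldOut_eq_foldl (ctx : List Char) (R : List Int) (b : Nat) :
    pvFoldOut ctx R b = R.foldl (fun best i => pvFoldIn ctx i.toNat pvKeywords best) b := by
  induction R generalizing b with
  | nil => rfl
  | cons i R ih => simp only [pvFoldOut, List.foldl_cons, ih]

theorem pvFoldOut_le (ctx : List Char) (R : List Int) (b : Nat) : pvFoldOut ctx R b ≤ b := by
  induction R generalizing b with
  | nil => simp [pvFoldOut]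
  | cons i R ih =>
    rw [show pvFoldOut ctx (i :: R) b = pvFoldOut ctx R (pvFoldIn ctx i.toNat pvKeywords b) from rfl]
    exact le_trans (ih _) (pvFoldIn_le ctx i.toNat pvKeywords b)

theorem pvFoldOut_cases (ctx : List Char) (R : List Int) (b : Nat) :
    pvFoldOut ctx R b = b ∨
      ∃ i ∈ R, ∃ e ∈ pvKeywords,
        pvStartsWithAt ctx i.toNat e.1 = true ∧ pvFoldOut ctx R b = e.2 := by
  induction R generalizing b with
  | nil => left; rfl
  | cons i R ih =>
    rw [show pvFoldOut ctx (i :: R) b = pvFoldOut ctx R (pvFoldIn ctx i.toNat pvKeywords b) from rfl]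
    rcases ih (pvFoldIn ctx i.toNat pvKeywords b) with h | ⟨i', hi', e', he', hm', hv'⟩
    · rcases pvFoldIn_cases ctx i.toNat pvKeywords b with h' | ⟨e, he, hm, hv⟩
      · left; rw [h, h']
      · right; exact ⟨i, List.mem_cons_self .., e, he, hm, by rw [h, hv]⟩
    · right; exact ⟨i', List.mem_cons_of_mem _ hi', e', he', hm', hv'⟩

theorem pvFoldOut_le_of_mem (ctx : List Char) (R : List Int) (b : Nat) (i : Int)
    (e : String × Nat) (he : e ∈ pvKeywords) (hm : pvStartsWithAt ctx i.toNat e.1 = true)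
    (hi : i ∈ R) : pvFoldOut ctx R b ≤ e.2 := by
  induction R generalizing b with
  | nil => cases hi
  | cons i' R ih =>
    rw [show pvFoldOut ctx (i' :: R) b = pvFoldOut ctx R (pvFoldIn ctx i'.toNat pvKeywords b) from rfl]
    rcases List.mem_cons.mp hi with rfl | hi'
    · exact le_trans (pvFoldOut_le ctx R _) (pvFoldIn_le_of_mem ctx i.toNat pvKeywords b e he hm)
    · exact ih _ hi'

theorem pvBest_eq (ctx : List Char) : pvBest ctx = pvFoldOut ctx (PySem.List.pyRange 0 (ctx.length : Int) 1) 16 :=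
  (pvFoldOut_eq_foldl ctx _ 16).symm

theorem pvBest_le (ctx : List Char) : pvBest ctx ≤ 16 := by
  rw [pvBest_eq]; exact pvFoldOut_le ctx _ 16

theorem pvBest_cases (ctx : List Char) :
    pvBest ctx = 16 ∨
      ∃ i ∈ PySem.List.pyRange 0 (ctx.length : Int) 1, ∃ e ∈ pvKeywords,
        pvStartsWithAt ctx i.toNat e.1 = true ∧ pvBest ctx = e.2 := by
  rw [pvBest_eq]; exact pvFoldOut_cases ctx _ 16

theorem pvBest_le_of (ctx : List Char) (i : Int)
    (hi : i ∈ PySem.List.pyRange 0 (ctx.length : Int) 1)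
    (e : String × Nat) (he : e ∈ pvKeywords) (hm : pvStartsWithAt ctx i.toNat e.1 = true) :
    pvBest ctx ≤ e.2 := by
  rw [pvBest_eq]; exact pvFoldOut_le_of_mem ctx _ 16 i e he hm hi

-- flat table vs groups, both directions (finite checks on the literal tables)
theorem pvKeywords_sound :
    ∀ e ∈ pvKeywords, e.2 < 16 ∧ e.1 ∈ pvGroups.getD e.2 [] ∧ e.1.toList ≠ [] := by decide

theorem pvKeywords_complete :
    ∀ p < 16, ∀ w ∈ pvGroups.getD p [], (w, p) ∈ pvKeywords ∧ w.toList ≠ [] := by decide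

-- bridge: group p matches the context iff some flat-table entry of priority p matches at some scanned offset
theorem pvM_iff (context : String) (p : Nat) (hp : p < 16) :
    pvM context p = true ↔
      ∃ i ∈ PySem.List.pyRange 0 ((context.toList.length : Int)) 1, ∃ e ∈ pvKeywords,
        e.2 = p ∧ pvStartsWithAt context.toList i.toNat e.1 = true := by
  constructor
  · intro h
    rcases List.any_eq_true.mp h with ⟨w, hw, hin⟩
    obtain ⟨hmem, hne⟩ := pvKeywords_complete p hp w hw
    rw [PySem.Str.isIn_iff_infix] at hin
    obtain ⟨j, hpre⟩ := (PySem.Chars.exists_prefix_drop_iff_isIn _ _).mpr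
      ((PySem.Chars.isIn_iff_infix _ _).mpr hin)
    have hj : j < context.toList.length := by
      by_contra hge
      rw [List.drop_eq_nil_of_le (le_of_not_gt hge)] at hpre
      exact hne (List.prefix_nil.mp hpre)
    refine ⟨(j : Int), ?_, (w, p), hmem, rfl, ?_⟩
    · rw [PySem.List.mem_pyRange_one]; omega
    · simp only [Int.toNat_natCast, pvStartsWithAt]
      exact List.isPrefixOf_iff_prefix.mpr hpre
  · rintro ⟨i, hi, e, he, rfl, hs⟩
    obtain ⟨-, hgrp, -⟩ := pvKeywords_sound e he
    refine List.any_eq_true.mpr ⟨e.1, hgrp, ?_⟩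
    rw [PySem.Str.isIn_iff_infix]
    apply (PySem.Chars.isIn_iff_infix _ _).mp
    apply (PySem.Chars.exists_prefix_drop_iff_isIn _ _).mp
    exact ⟨i.toNat, List.isPrefixOf_iff_prefix.mp (by exact hs)⟩

-- the scan's result is exactly the first matching group (16 when none matches)
theorem pvBest_eq_of (context : String) (j : Nat) (hj : j ≤ 16)
    (hm : j < 16 → pvM context j = true)
    (hlt : ∀ p < j, pvM context p = false) :
    pvBest context.toList = j := by
  have h16 := pvBest_le context.toList
  have hub : pvBest context.toList ≤ j := by
    rcases Nat.lt_or_ge j 16 with hj16 | hj16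
    · obtain ⟨i, hi, e, he, hep, hs⟩ := (pvM_iff context j hj16).mp (hm hj16)
      have := pvBest_le_of context.toList i hi e he hs
      omega
    · omega
  have hlow : ¬ pvBest context.toList < j := by
    intro hc
    rcases pvBest_cases context.toList with h | ⟨i, hi, e, he, hs, hv⟩
    · omega
    · obtain ⟨he16, -, -⟩ := pvKeywords_sound e he
      have hmm : pvM context e.2 = true :=
        (pvM_iff context e.2 he16).mpr ⟨i, hi, e, he, rfl, hs⟩
      have := hlt e.2 (by omega)
      rw [this] at hmm
      exact Bool.false_ne_true hmm
  omega

-- A's chain, with each branch condition read as pvM, equals the scan's table lookup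
theorem pvChain_eq (context : String) :
    ((if pvM context 0 = true then "Enter name"
       else if pvM context 1 = true then "Enter address"
       else if pvM context 2 = true then "Enter date"
       else if pvM context 3 = true then "Enter phone number"
       else if pvM context 4 = true then "Enter email"
       else if pvM context 5 = true then "Enter ID number"
       else if pvM context 6 = true then "Enter signature"
       else if pvM context 7 = true then "Enter amount"
       else if pvM context 8 = true then "Enter age"
       else if pvM context 9 = true then "Enter company name"
       else if pvM context 10 = true then "Enter position"
       else if pvM context 11 = true then "Enter department"
       else if pvM context 12 = true then "Enter city"
       else if pvM context 13 = true then "Enter country"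
       else if pvM context 14 = true then "Enter postcode"
       else if pvM context 15 = true then "Enter yes/no"
       else "Enter value")
      : String) = pvResults.getD (pvBest context.toList) "Enter value" := by
  by_cases h0 : pvM context 0 = true
  · rw [if_pos h0, pvBest_eq_of context 0 (by omega) (fun _ => h0) (by intro p hp; omega)]; rfl
  rw [if_neg h0]
  by_cases h1 : pvM context 1 = true
  · rw [if_pos h1, pvBest_eq_of context 1 (by omega) (fun _ => h1) (by intro p hp; interval_cases p; simp_all)]; rfl
  rw [if_neg h1]
  by_cases h2 : pvM context 2 = true
  · rw [if_pos h2, pvBest_eq_of context 2 (by omega) (fun _ => h2) (by intro p hp; interval_cases p <;> simp_all)]; rfl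
  rw [if_neg h2]
  by_cases h3 : pvM context 3 = true
  · rw [if_pos h3, pvBest_eq_of context 3 (by omega) (fun _ => h3) (by intro p hp; interval_cases p <;> simp_all)]; rfl
  rw [if_neg h3]
  by_cases h4 : pvM context 4 = true
  · rw [if_pos h4, pvBest_eq_of context 4 (by omega) (fun _ => h4) (by intro p hp; interval_cases p <;> simp_all)]; rfl
  rw [if_neg h4]
  by_cases h5 : pvM context 5 = true
  · rw [if_pos h5, pvBest_eq_of context 5 (by omega) (fun _ => h5) (by intro p hp; interval_cases p <;> simp_all)]; rfl
  rw [if_neg h5]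
  by_cases h6 : pvM context 6 = true
  · rw [if_pos h6, pvBest_eq_of context 6 (by omega) (fun _ => h6) (by intro p hp; interval_cases p <;> simp_all)]; rfl
  rw [if_neg h6]
  by_cases h7 : pvM context 7 = true
  · rw [if_pos h7, pvBest_eq_of context 7 (by omega) (fun _ => h7) (by intro p hp; interval_cases p <;> simp_all)]; rfl
  rw [if_neg h7]
  by_cases h8 : pvM context 8 = true
  · rw [if_pos h8, pvBest_eq_of context 8 (by omega) (fun _ => h8) (by intro p hp; interval_cases p <;> simp_all)]; rfl
  rw [if_neg h8]
  by_cases h9 : pvM context 9 = true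
  · rw [if_pos h9, pvBest_eq_of context 9 (by omega) (fun _ => h9) (by intro p hp; interval_cases p <;> simp_all)]; rfl
  rw [if_neg h9]
  by_cases h10 : pvM context 10 = true
  · rw [if_pos h10, pvBest_eq_of context 10 (by omega) (fun _ => h10) (by intro p hp; interval_cases p <;> simp_all)]; rfl
  rw [if_neg h10]
  by_cases h11 : pvM context 11 = true
  · rw [if_pos h11, pvBest_eq_of context 11 (by omega) (fun _ => h11) (by intro p hp; interval_cases p <;> simp_all)]; rfl
  rw [if_neg h11]
  by_cases h12 : pvM context 12 = true
  · rw [if_pos h12, pvBest_eq_of context 12 (by omega) (fun _ => h12) (by intro p hp; interval_cases p <;> simp_all)]; rfl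
  rw [if_neg h12]
  by_cases h13 : pvM context 13 = true
  · rw [if_pos h13, pvBest_eq_of context 13 (by omega) (fun _ => h13) (by intro p hp; interval_cases p <;> simp_all)]; rfl
  rw [if_neg h13]
  by_cases h14 : pvM context 14 = true
  · rw [if_pos h14, pvBest_eq_of context 14 (by omega) (fun _ => h14) (by intro p hp; interval_cases p <;> simp_all)]; rfl
  rw [if_neg h14]
  by_cases h15 : pvM context 15 = true
  · rw [if_pos h15, pvBest_eq_of context 15 (by omega) (fun _ => h15) (by intro p hp; interval_cases p <;> simp_all)]; rfl
  rw [if_neg h15]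
  rw [pvBest_eq_of context 16 le_rfl (by omega) (by intro p hp; interval_cases p <;> simp_all)]; rfl

-- ===== VERDICT (by name: the statement is the Claim_ definition above) =====
theorem generate_contextual_placeholder_py_spec : Claim_equal_generate_contextual_placeholder_py := by
  intro text position _
  unfold Spec_generate_contextual_placeholder_py generate_contextual_placeholder_py generate_contextual_placeholder_py_alt
  exact pvChain_eq _
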